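-- pv_equiv track=rewrite | github.com/matthewmisiaszek/aoc_solves | AoC_2023/AoC_2023_18.py | intersection_length
-- ===== SOURCE A (Python) =====
-- from itertools import product
--
-- def intersection_length(cranges, nranges):
--     il = 0
--     for (ca, cb), (na, nb) in product(cranges, nranges):
--         ia = max(ca, na)
--         ib = min(cb, nb)
--         if ib >= ia:
--             il += (ib - ia + 1)
--     return il
-- ===== SOURCE B (Python) =====
-- def intersection_length(cranges, nranges):
--     events = []
--     for a, b in cranges:
--         if a <= b:
--             events.append((a, 1, 0))
--             events.append((b + 1, -1, 0))
--     for a, b in nranges: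
--         if a <= b:
--             events.append((a, 0, 1))
--             events.append((b + 1, 0, -1))
--     events.sort(key=lambda e: e[0])
--     total = 0
--     cc = nc = 0
--     prev = None
--     for x, dc, dn in events:
--         if prev is not None and prev < x:
--             total += cc * nc * (x - prev)
--         cc += dc
--         nc += dn
--         prev = x
--     return total
-- ===== Notes on version B (the rewrite author's own statement) =====
-- stated objective: faster
-- what changed: Replaced the quadratic all-pairs overlap sum by a coordinate sweep: emit +1/-1 boundary events for each valid range, sort them, and accumulate per-segment coverage-count products times segment length.
import Mathlib
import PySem

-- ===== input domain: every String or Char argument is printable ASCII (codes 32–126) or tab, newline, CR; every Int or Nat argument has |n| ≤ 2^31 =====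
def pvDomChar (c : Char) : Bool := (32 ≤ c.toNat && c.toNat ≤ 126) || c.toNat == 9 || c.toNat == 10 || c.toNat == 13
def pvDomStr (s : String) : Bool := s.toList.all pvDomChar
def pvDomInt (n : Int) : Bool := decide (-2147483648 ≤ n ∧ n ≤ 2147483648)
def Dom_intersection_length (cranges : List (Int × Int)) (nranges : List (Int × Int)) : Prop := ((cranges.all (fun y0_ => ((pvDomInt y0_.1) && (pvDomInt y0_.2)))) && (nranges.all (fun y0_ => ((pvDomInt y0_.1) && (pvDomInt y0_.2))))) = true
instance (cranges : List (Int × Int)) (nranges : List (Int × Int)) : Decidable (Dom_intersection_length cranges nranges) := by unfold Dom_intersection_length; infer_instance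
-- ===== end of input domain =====

-- B replaces A's all-pairs overlap sum by an endpoint sweep (sort boundary events, accumulate
-- coverage-count products times segment length); objective: faster (asymptotic).

-- ===== PORT A =====
def intersection_length (cranges : List (Int × Int)) (nranges : List (Int × Int)) : Int :=
  cranges.foldl (fun il c =>
    nranges.foldl (fun il n =>
      let ia := max c.1 n.1
      let ib := min c.2 n.2
      if ib ≥ ia then il + (ib - ia + 1) else il) il) 0

-- ===== PORT B =====
-- one step of B's sweep loop: close the segment [prev, x), then apply the event's deltas
def pvSweepStep (st : Int × Int × Int × Option Int) (e : Int × Int × Int) : Int × Int × Int × Option Int :=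
  let total := match st.2.2.2 with
    | some p => if p < e.1 then st.1 + st.2.1 * st.2.2.1 * (e.1 - p) else st.1
    | none => st.1
  (total, st.2.1 + e.2.1, st.2.2.1 + e.2.2, some e.1)

def intersection_length_alt (cranges : List (Int × Int)) (nranges : List (Int × Int)) : Int :=
  let ev1 := cranges.foldl (fun acc r =>
    if r.1 ≤ r.2 then acc ++ [(r.1, (1 : Int), (0 : Int)), (r.2 + 1, -1, 0)] else acc) []
  let ev2 := nranges.foldl (fun acc r =>
    if r.1 ≤ r.2 then acc ++ [(r.1, (0 : Int), (1 : Int)), (r.2 + 1, 0, -1)] else acc) ev1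
  let evs := PySem.List.sorted ev2 (fun e => e.1) false
  (evs.foldl pvSweepStep (0, 0, 0, none)).1

-- ===== PRECONDITION & SPEC =====
def Spec_intersection_length (cranges : List (Int × Int)) (nranges : List (Int × Int)) (out : Int) : Prop := out = intersection_length_alt cranges nranges
instance (cranges : List (Int × Int)) (nranges : List (Int × Int)) (out : Int) : Decidable (Spec_intersection_length cranges nranges out) := by unfold Spec_intersection_length; infer_instance

-- ===== CLAIM (what is proved, stated in full; the proofs are below) =====
def Claim_equal_intersection_length : Prop := ∀ (cranges : List (Int × Int)) (nranges : List (Int × Int)), Dom_intersection_length cranges nranges → Spec_intersection_length cranges nranges (intersection_length cranges nranges)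

-- ===== LEMMAS AND PROOFS =====

-- number of (multiset) ranges in rs covering the integer point x
def pvCov (rs : List (Int × Int)) (x : Int) : Int :=
  (rs.map (fun r => if r.1 ≤ x ∧ x ≤ r.2 then (1 : Int) else 0)).sum

-- sum of first (resp. second) deltas of the events with coordinate ≤ y
def pvDC (es : List (Int × Int × Int)) (y : Int) : Int :=
  (es.map (fun e => if e.1 ≤ y then e.2.1 else 0)).sum
def pvDN (es : List (Int × Int × Int)) (y : Int) : Int :=
  (es.map (fun e => if e.1 ≤ y then e.2.2 else 0)).sum

-- the boundary events B emits for the valid ranges of rs, with per-range deltas (u, v)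
def pvEvents (rs : List (Int × Int)) (u v : Int) : List (Int × Int × Int) :=
  rs.flatMap (fun r => if r.1 ≤ r.2 then [(r.1, u, v), (r.2 + 1, -u, -v)] else [])

-- the common mathematical value: pointwise product of coverages summed over the whole domain
noncomputable def pvS (c n : List (Int × Int)) : Int :=
  ∑ x ∈ Finset.Ico (-2147483648 : Int) (2147483648 + 1), pvCov c x * pvCov n x

lemma pvA_inner (c : Int × Int) (nranges : List (Int × Int)) (il : Int) :
    nranges.foldl (fun il n =>
      let ia := max c.1 n.1
      let ib := min c.2 n.2
      if ib ≥ ia then il + (ib - ia + 1) else il) il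
    = il + (nranges.map (fun n =>
        if max c.1 n.1 ≤ min c.2 n.2 then min c.2 n.2 - max c.1 n.1 + 1 else 0)).sum := by
  induction nranges generalizing il with
  | nil => simp
  | cons h t ih =>
    simp only [List.foldl_cons, List.map_cons, List.sum_cons, ih, ge_iff_le]
    split_ifs <;> ring


lemma pvPair (a b : Int) (ha : -2147483648 ≤ a) (hb : b ≤ 2147483648) :
    (if a ≤ b then b - a + 1 else 0)
    = ∑ x ∈ Finset.Ico (-2147483648 : Int) (2147483648 + 1),
        (if a ≤ x ∧ x ≤ b then (1 : Int) else 0) := by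
  have : (fun x => if a ≤ x ∧ x ≤ b then (1:Int) else 0) = fun x => if x ∈ Finset.Icc a b then 1 else 0 := by
    funext x; simp [Finset.mem_Icc]
  rw [this, Finset.sum_ite_mem]
  by_cases hab : a ≤ b
  · have hsub : Finset.Icc a b ⊆ Finset.Ico (-2147483648 : Int) (2147483648 + 1) := by
      intro x hx
      simp only [Finset.mem_Icc] at hx
      simp only [Finset.mem_Ico]
      omega
    rw [Finset.inter_eq_right.mpr hsub, Finset.sum_const, Int.card_Icc]
    simp [hab]
    omega
  · rw [Finset.Icc_eq_empty hab]
    simp [hab]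

lemma pvSwap {α : Type} (l : List α) (s : Finset Int) (g : α → Int → Int) :
    (l.map (fun c => ∑ x ∈ s, g c x)).sum = ∑ x ∈ s, (l.map (fun c => g c x)).sum := by
  induction l with
  | nil => simp
  | cons h t ih => simp [ih, Finset.sum_add_distrib]

lemma pvA_sum (cranges nranges : List (Int × Int)) :
    intersection_length cranges nranges
    = (cranges.map (fun c => (nranges.map (fun n =>
        if max c.1 n.1 ≤ min c.2 n.2 then min c.2 n.2 - max c.1 n.1 + 1 else 0)).sum)).sum := by
  unfold intersection_length
  rw [show (fun il (c : Int × Int) =>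
      nranges.foldl (fun il n =>
        let ia := max c.1 n.1
        let ib := min c.2 n.2
        if ib ≥ ia then il + (ib - ia + 1) else il) il)
      = fun il (c : Int × Int) => il + (nranges.map (fun n =>
          if max c.1 n.1 ≤ min c.2 n.2 then min c.2 n.2 - max c.1 n.1 + 1 else 0)).sum
    from funext fun il => funext fun c => pvA_inner c nranges il]
  rw [PySem.List.foldl_add]
  simp

lemma prodind (c n : Int × Int) (x : Int) :
    (if c.1 ≤ x ∧ x ≤ c.2 then (1 : Int) else 0) * (if n.1 ≤ x ∧ x ≤ n.2 then (1 : Int) else 0)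
    = if max c.1 n.1 ≤ x ∧ x ≤ min c.2 n.2 then (1 : Int) else 0 := by
  split_ifs <;> (try norm_num) <;> omega

lemma pvA_eq_S (cranges nranges : List (Int × Int))
    (hc : ∀ r ∈ cranges, -2147483648 ≤ r.1 ∧ r.1 ≤ 2147483648 ∧ -2147483648 ≤ r.2 ∧ r.2 ≤ 2147483648)
    (_hn : ∀ r ∈ nranges, -2147483648 ≤ r.1 ∧ r.1 ≤ 2147483648 ∧ -2147483648 ≤ r.2 ∧ r.2 ≤ 2147483648) :
    intersection_length cranges nranges = pvS cranges nranges := by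
  rw [pvA_sum]
  have step : ∀ c ∈ cranges, (nranges.map (fun n =>
      if max c.1 n.1 ≤ min c.2 n.2 then min c.2 n.2 - max c.1 n.1 + 1 else 0)).sum
      = ∑ x ∈ Finset.Ico (-2147483648 : Int) (2147483648 + 1),
          (nranges.map (fun n =>
            (if c.1 ≤ x ∧ x ≤ c.2 then (1 : Int) else 0) * (if n.1 ≤ x ∧ x ≤ n.2 then 1 else 0))).sum := by
    intro c hcmem
    rw [← pvSwap]
    apply congrArg
    apply List.map_congr_left
    intro n hnmem
    rw [pvPair (max c.1 n.1) (min c.2 n.2)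
        (le_max_of_le_left (hc c hcmem).1) (min_le_of_left_le (hc c hcmem).2.2.2)]
    apply Finset.sum_congr rfl
    intro x _
    rw [prodind]
  rw [List.map_congr_left step, pvSwap]
  unfold pvS
  apply Finset.sum_congr rfl
  intro x _
  rw [show (fun c : Int × Int => (nranges.map (fun n =>
      (if c.1 ≤ x ∧ x ≤ c.2 then (1 : Int) else 0) * (if n.1 ≤ x ∧ x ≤ n.2 then 1 else 0))).sum)
      = fun c : Int × Int => (if c.1 ≤ x ∧ x ≤ c.2 then (1 : Int) else 0) * pvCov nranges x by
    funext c
    rw [pvCov, ← List.sum_map_mul_left]]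
  rw [List.sum_map_mul_right]
  simp [pvCov]

-- ---- B side ----

lemma pvEvFold (f : (Int × Int) → List (Int × Int × Int)) (l : List (Int × Int)) (init : List (Int × Int × Int)) :
    l.foldl (fun acc r => if r.1 ≤ r.2 then acc ++ f r else acc) init
    = init ++ l.flatMap (fun r => if r.1 ≤ r.2 then f r else []) := by
  induction l generalizing init with
  | nil => simp
  | cons h t ih =>
    simp only [List.foldl_cons, List.flatMap_cons]
    split <;> simp [ih]

lemma pvDC_events (rs : List (Int × Int)) (u v y : Int) :
    pvDC (pvEvents rs u v) y = (rs.map (fun r => if r.1 ≤ y ∧ y ≤ r.2 then u else 0)).sum := by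
  induction rs with
  | nil => simp [pvDC, pvEvents]
  | cons r t ih =>
    simp only [pvEvents, List.flatMap_cons, pvDC, List.map_append, List.sum_append] at *
    rw [ih]
    simp only [List.map_cons, List.sum_cons]
    have : (List.map (fun e => if e.1 ≤ y then e.2.1 else 0)
        (if r.1 ≤ r.2 then [(r.1, u, v), (r.2 + 1, -u, -v)] else [])).sum
        = if r.1 ≤ y ∧ y ≤ r.2 then u else 0 := by
      split_ifs with h1 h2 <;> simp only [List.map_cons, List.sum_cons, List.map_nil, List.sum_nil] <;> first | (split_ifs <;> omega) | omega
    rw [this]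

lemma pvDN_events (rs : List (Int × Int)) (u v y : Int) :
    pvDN (pvEvents rs u v) y = (rs.map (fun r => if r.1 ≤ y ∧ y ≤ r.2 then v else 0)).sum := by
  induction rs with
  | nil => simp [pvDN, pvEvents]
  | cons r t ih =>
    simp only [pvEvents, List.flatMap_cons, pvDN, List.map_append, List.sum_append] at *
    rw [ih]
    simp only [List.map_cons, List.sum_cons]
    have : (List.map (fun e => if e.1 ≤ y then e.2.2 else 0)
        (if r.1 ≤ r.2 then [(r.1, u, v), (r.2 + 1, -u, -v)] else [])).sum
        = if r.1 ≤ y ∧ y ≤ r.2 then v else 0 := by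
      split_ifs with h1 h2 <;> simp only [List.map_cons, List.sum_cons, List.map_nil, List.sum_nil] <;> first | (split_ifs <;> omega) | omega
    rw [this]

lemma pvDC_perm {es fs : List (Int × Int × Int)} (h : es.Perm fs) (y : Int) :
    pvDC es y = pvDC fs y := (h.map _).sum_eq
lemma pvDN_perm {es fs : List (Int × Int × Int)} (h : es.Perm fs) (y : Int) :
    pvDN es y = pvDN fs y := (h.map _).sum_eq
lemma pvDC_cons (e : Int × Int × Int) (es : List (Int × Int × Int)) (y : Int) :
    pvDC (e :: es) y = (if e.1 ≤ y then e.2.1 else 0) + pvDC es y := by simp [pvDC]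
lemma pvDN_cons (e : Int × Int × Int) (es : List (Int × Int × Int)) (y : Int) :
    pvDN (e :: es) y = (if e.1 ≤ y then e.2.2 else 0) + pvDN es y := by simp [pvDN]

lemma pvEvents_coord (rs : List (Int × Int)) (u v : Int)
    (h : ∀ r ∈ rs, -2147483648 ≤ r.1 ∧ r.1 ≤ 2147483648 ∧ -2147483648 ≤ r.2 ∧ r.2 ≤ 2147483648) :
    ∀ e ∈ pvEvents rs u v, -2147483648 ≤ e.1 ∧ e.1 ≤ 2147483648 + 1 := by
  intro e he
  obtain ⟨r, hr, hmem⟩ := List.mem_flatMap.mp he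
  have hb := h r hr
  by_cases hv : r.1 ≤ r.2
  · rw [if_pos hv] at hmem
    simp only [List.mem_cons, List.not_mem_nil, or_false] at hmem
    rcases hmem with h1 | h1 <;> (rw [h1]; constructor <;> simp <;> omega)
  · rw [if_neg hv] at hmem; cases hmem

lemma pvCov_vanish (rs : List (Int × Int))
    (h : ∀ r ∈ rs, -2147483648 ≤ r.1 ∧ r.1 ≤ 2147483648 ∧ -2147483648 ≤ r.2 ∧ r.2 ≤ 2147483648) :
    ∀ y, 2147483648 < y → pvCov rs y = 0 := by
  intro y hy
  apply List.sum_eq_zero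
  intro x hx
  obtain ⟨r, hr, rfl⟩ := List.mem_map.mp hx
  have := h r hr
  simp only [ite_eq_right_iff]
  intro hc
  omega

lemma pvDC_zero_of_lt (es : List (Int × Int × Int)) (t : Int) (h : ∀ e ∈ es, t < e.1) :
    pvDC es t = 0 := by
  apply List.sum_eq_zero
  intro x hx
  obtain ⟨e, he, rfl⟩ := List.mem_map.mp hx
  simp [show ¬ e.1 ≤ t from not_le.mpr (h e he)]

lemma pvDN_zero_of_lt (es : List (Int × Int × Int)) (t : Int) (h : ∀ e ∈ es, t < e.1) :
    pvDN es t = 0 := by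
  apply List.sum_eq_zero
  intro x hx
  obtain ⟨e, he, rfl⟩ := List.mem_map.mp hx
  simp [show ¬ e.1 ≤ t from not_le.mpr (h e he)]

lemma pvSweep (es : List (Int × Int × Int)) (c n : List (Int × Int)) :
    ∀ (total cc nc p : Int),
    es.Pairwise (fun e f => e.1 ≤ f.1) →
    (∀ e ∈ es, p ≤ e.1 ∧ e.1 ≤ 2147483648 + 1) →
    (∀ y, p ≤ y → pvCov c y = cc + pvDC es y) →
    (∀ y, p ≤ y → pvCov n y = nc + pvDN es y) →
    (∀ y, 2147483648 < y → pvCov c y = 0) →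
    (es.foldl pvSweepStep (total, cc, nc, some p)).1
    = total + ∑ x ∈ Finset.Ico p (2147483648 + 1), pvCov c x * pvCov n x := by
  induction es with
  | nil =>
    intro total cc nc p _ _ hC hN hvan
    simp only [List.foldl_nil]
    have hcc : cc = 0 := by
      have h1 := hC (max p (2147483648 + 1)) (le_max_left _ _)
      have h2 := hvan (max p (2147483648 + 1)) (by omega)
      rw [h2] at h1
      simp [pvDC] at h1
      omega
    have : ∀ x ∈ Finset.Ico p (2147483648 + 1), pvCov c x * pvCov n x = 0 := by
      intro x hx
      have := hC x (Finset.mem_Ico.mp hx).1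
      simp [pvDC] at this
      rw [this, hcc]
      ring
    rw [Finset.sum_eq_zero this]
    ring
  | cons e rest ih =>
    intro total cc nc p hsort hcoord hC hN hvan
    have hpe : p ≤ e.1 := (hcoord e (List.mem_cons_self)).1
    have heB : e.1 ≤ 2147483648 + 1 := (hcoord e (List.mem_cons_self)).2
    have hrest_sort := (List.pairwise_cons.mp hsort).2
    have hhead := (List.pairwise_cons.mp hsort).1
    have hrest_coord : ∀ f ∈ rest, e.1 ≤ f.1 ∧ f.1 ≤ 2147483648 + 1 :=
      fun f hf => ⟨hhead f hf, (hcoord f (List.mem_cons_of_mem _ hf)).2⟩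
    have hC' : ∀ y, e.1 ≤ y → pvCov c y = (cc + e.2.1) + pvDC rest y := by
      intro y hy
      rw [hC y (le_trans hpe hy), pvDC_cons, if_pos hy]
      ring
    have hN' : ∀ y, e.1 ≤ y → pvCov n y = (nc + e.2.2) + pvDN rest y := by
      intro y hy
      rw [hN y (le_trans hpe hy), pvDN_cons, if_pos hy]
      ring
    simp only [List.foldl_cons]
    by_cases hlt : p < e.1
    · have hstep : pvSweepStep (total, cc, nc, some p) e
          = (total + cc * nc * (e.1 - p), cc + e.2.1, nc + e.2.2, some e.1) := by
        simp [pvSweepStep, hlt]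
      rw [hstep, ih _ _ _ _ hrest_sort hrest_coord hC' hN' hvan]
      rw [← Finset.Ico_union_Ico_eq_Ico (le_of_lt hlt) heB,
          Finset.sum_union (Finset.Ico_disjoint_Ico_consecutive _ _ _)]
      have hconst : ∀ x ∈ Finset.Ico p e.1, pvCov c x * pvCov n x = cc * nc := by
        intro x hx
        obtain ⟨hx1, hx2⟩ := Finset.mem_Ico.mp hx
        have hz : pvDC (e :: rest) x = 0 := by
          apply pvDC_zero_of_lt
          intro f hf
          rcases List.mem_cons.mp hf with h | h
          · rw [h]; omega
          · have := hhead f h; omega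
        have hzn : pvDN (e :: rest) x = 0 := by
          apply pvDN_zero_of_lt
          intro f hf
          rcases List.mem_cons.mp hf with h | h
          · rw [h]; omega
          · have := hhead f h; omega
        rw [hC x hx1, hN x hx1, hz, hzn]
        ring
      rw [Finset.sum_congr rfl hconst, Finset.sum_const, Int.card_Ico,
          nsmul_eq_mul, Int.toNat_of_nonneg (by omega : (0:Int) ≤ e.1 - p)]
      ring
    · have hpeq : e.1 = p := by omega
      have hstep : pvSweepStep (total, cc, nc, some p) e
          = (total, cc + e.2.1, nc + e.2.2, some e.1) := by
        simp [pvSweepStep, hlt]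
      rw [hstep, ih _ _ _ _ hrest_sort hrest_coord hC' hN' hvan, hpeq]

lemma pvB_eq_S (cranges nranges : List (Int × Int))
    (hc : ∀ r ∈ cranges, -2147483648 ≤ r.1 ∧ r.1 ≤ 2147483648 ∧ -2147483648 ≤ r.2 ∧ r.2 ≤ 2147483648)
    (hn : ∀ r ∈ nranges, -2147483648 ≤ r.1 ∧ r.1 ≤ 2147483648 ∧ -2147483648 ≤ r.2 ∧ r.2 ≤ 2147483648) :
    intersection_length_alt cranges nranges = pvS cranges nranges := by
  show (List.foldl pvSweepStep (0, 0, 0, none)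
      (PySem.List.sorted
        (List.foldl (fun acc r =>
            if r.1 ≤ r.2 then acc ++ [(r.1, (0 : Int), (1 : Int)), (r.2 + 1, 0, -1)] else acc)
          (List.foldl (fun acc r =>
            if r.1 ≤ r.2 then acc ++ [(r.1, (1 : Int), (0 : Int)), (r.2 + 1, -1, 0)] else acc)
            [] cranges) nranges)
        (fun e => e.1) false)).1 = pvS cranges nranges
  rw [pvEvFold, pvEvFold, List.nil_append]
  rw [show (cranges.flatMap (fun r => if r.1 ≤ r.2 then [(r.1, (1 : Int), (0 : Int)), (r.2 + 1, -1, 0)] else []))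
      = pvEvents cranges 1 0 by simp [pvEvents]]
  rw [show (nranges.flatMap (fun r => if r.1 ≤ r.2 then [(r.1, (0 : Int), (1 : Int)), (r.2 + 1, 0, -1)] else []))
      = pvEvents nranges 0 1 by simp [pvEvents]]
  have hperm : (PySem.List.sorted (pvEvents cranges 1 0 ++ pvEvents nranges 0 1)
      (fun e => e.1) false).Perm (pvEvents cranges 1 0 ++ pvEvents nranges 0 1) :=
    PySem.List.sorted_perm _ _ _
  have hpair : (PySem.List.sorted (pvEvents cranges 1 0 ++ pvEvents nranges 0 1)
      (fun e => e.1) false).Pairwise (fun a b => a.1 ≤ b.1) :=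
    PySem.List.sorted_pairwise _ _
  have hCid : ∀ y, pvCov cranges y
      = pvDC (PySem.List.sorted (pvEvents cranges 1 0 ++ pvEvents nranges 0 1) (fun e => e.1) false) y := by
    intro y
    rw [pvDC_perm hperm]
    rw [show pvDC (pvEvents cranges 1 0 ++ pvEvents nranges 0 1) y
        = pvDC (pvEvents cranges 1 0) y + pvDC (pvEvents nranges 0 1) y by simp [pvDC]]
    rw [pvDC_events, pvDC_events]
    simp [pvCov]
  have hNid : ∀ y, pvCov nranges y
      = pvDN (PySem.List.sorted (pvEvents cranges 1 0 ++ pvEvents nranges 0 1) (fun e => e.1) false) y := by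
    intro y
    rw [pvDN_perm hperm]
    rw [show pvDN (pvEvents cranges 1 0 ++ pvEvents nranges 0 1) y
        = pvDN (pvEvents cranges 1 0) y + pvDN (pvEvents nranges 0 1) y by simp [pvDN]]
    rw [pvDN_events, pvDN_events]
    simp [pvCov]
  have hbound : ∀ e ∈ (PySem.List.sorted (pvEvents cranges 1 0 ++ pvEvents nranges 0 1)
      (fun e => e.1) false), -2147483648 ≤ e.1 ∧ e.1 ≤ 2147483648 + 1 := by
    intro e he
    have hmem : e ∈ pvEvents cranges 1 0 ++ pvEvents nranges 0 1 := hperm.mem_iff.mp he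
    rcases List.mem_append.mp hmem with h | h
    · exact pvEvents_coord cranges 1 0 hc e h
    · exact pvEvents_coord nranges 0 1 hn e h
  have hvan := pvCov_vanish cranges hc
  cases hevs : PySem.List.sorted (pvEvents cranges 1 0 ++ pvEvents nranges 0 1) (fun e => e.1) false with
  | nil =>
    simp only [List.foldl_nil]
    have hzero : ∀ x : Int, pvCov cranges x = 0 := by
      intro x; rw [hCid x, hevs]; simp [pvDC]
    unfold pvS
    rw [Finset.sum_eq_zero]
    intro x _
    rw [hzero x]
    ring
  | cons e rest =>
    rw [hevs] at hCid hNid hbound hpair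
    simp only [List.foldl_cons]
    have hstep : pvSweepStep (0, 0, 0, none) e = (0, e.2.1, e.2.2, some e.1) := by
      simp [pvSweepStep]
    rw [hstep]
    have hrest_sort := (List.pairwise_cons.mp hpair).2
    have hhead := (List.pairwise_cons.mp hpair).1
    rw [pvSweep rest cranges nranges 0 e.2.1 e.2.2 e.1 hrest_sort
      (fun f hf => ⟨hhead f hf, (hbound f (List.mem_cons_of_mem _ hf)).2⟩)
      (by intro y hy
          rw [hCid y, pvDC_cons, if_pos hy])
      (by intro y hy
          rw [hNid y, pvDN_cons, if_pos hy])
      hvan]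
    unfold pvS
    rw [zero_add]
    apply Finset.sum_subset
    · intro x hx
      obtain ⟨h1, h2⟩ := Finset.mem_Ico.mp hx
      have := (hbound e (List.mem_cons_self)).1
      exact Finset.mem_Ico.mpr ⟨by omega, h2⟩
    · intro x hx hnx
      have hx1 := (Finset.mem_Ico.mp hx).2
      have hxe : x < e.1 := by
        by_contra hge
        exact hnx (Finset.mem_Ico.mpr ⟨by omega, hx1⟩)
      have : pvCov cranges x = 0 := by
        rw [hCid x]
        apply pvDC_zero_of_lt
        intro f hf
        rcases List.mem_cons.mp hf with h | h
        · rw [h]; omega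
        · have := hhead f h; omega
      rw [this]
      ring

-- ===== VERDICT (by name: the statement is the Claim_ definition above) =====
theorem intersection_length_spec : Claim_equal_intersection_length := by
  intro cranges nranges hdom
  unfold Spec_intersection_length
  unfold Dom_intersection_length at hdom
  simp only [Bool.and_eq_true, List.all_eq_true, pvDomInt, decide_eq_true_eq] at hdom
  obtain ⟨h1, h2⟩ := hdom
  have hc : ∀ r ∈ cranges, -2147483648 ≤ r.1 ∧ r.1 ≤ 2147483648 ∧ -2147483648 ≤ r.2 ∧ r.2 ≤ 2147483648 := by
    intro r hr; have := h1 r hr; tauto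
  have hn : ∀ r ∈ nranges, -2147483648 ≤ r.1 ∧ r.1 ≤ 2147483648 ∧ -2147483648 ≤ r.2 ∧ r.2 ≤ 2147483648 := by
    intro r hr; have := h2 r hr; tauto
  rw [pvA_eq_S cranges nranges hc hn, pvB_eq_S cranges nranges hc hn]
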